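-- pv_equiv track=rewrite | github.com/AP-MI-2021/lab-4-IonutSancraianu | main.py | cmmdc_and_inverted_neg
-- ===== SOURCE A (Python) =====
-- def cmmdc_and_inverted_neg(lst):
--     """
--     Functia afiseaza o lista pe baza listei parametru in care elementele inițială în care numerele pozitive și nenule au fost înlocuite cu
-- CMMDC-ul lor și numerele negative au cifrele în ordine inversă
--     :param lst: o lista de numere intregi
--     :return: o lista noua cu elemetele modificate conform cerintei de mai sus
--     """
--     l_fin = []
--     for i in lst:
--         if i < 0:
--             i = str(abs(i))
--             l_fin.append(0-int(i[::-1]))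
--         else:
--             l_fin.append(i)
--     return l_fin
-- ===== SOURCE B (Python) =====
-- def cmmdc_and_inverted_neg(lst):
--     res = []
--     for i in lst:
--         if i < 0:
--             n = -i
--             rev = 0
--             while n:
--                 rev = rev * 10 + n % 10
--                 n //= 10
--             res.append(-rev)
--         else:
--             res.append(i)
--     return res
-- ===== Notes on version B (the rewrite author's own statement) =====
-- stated objective: alternative
-- what changed: Negative elements' digits are reversed by an arithmetic while-loop (rev = rev*10 + n%10; n //= 10) instead of converting to a string, slicing it reversed, and parsing it back with int().
import Mathlib
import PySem

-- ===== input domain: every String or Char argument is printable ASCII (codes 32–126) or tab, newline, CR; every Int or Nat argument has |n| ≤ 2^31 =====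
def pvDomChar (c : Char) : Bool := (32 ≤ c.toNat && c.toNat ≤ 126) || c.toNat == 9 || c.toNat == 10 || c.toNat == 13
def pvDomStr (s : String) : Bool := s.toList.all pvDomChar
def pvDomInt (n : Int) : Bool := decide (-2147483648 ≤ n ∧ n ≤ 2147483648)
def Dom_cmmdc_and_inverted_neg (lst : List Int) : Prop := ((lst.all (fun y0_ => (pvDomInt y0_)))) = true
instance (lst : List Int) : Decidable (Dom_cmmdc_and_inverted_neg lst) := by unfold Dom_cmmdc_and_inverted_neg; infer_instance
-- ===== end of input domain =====

-- ===== PORT A =====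
-- B reverses a negative element's digits arithmetically instead of via str/slice/int (alternative decomposition).

-- int(s) hand-ported for the one call site in A: there s is the reversal of str(abs(i)) for i < 0,
-- a nonempty list of ASCII digit characters, on which this left-to-right fold is exactly Python's int().
def pvIntOfDigits (cs : List Char) : Int :=
  cs.foldl (fun a c => a * 10 + ((c.toNat : Int) - 48)) 0

def cmmdc_and_inverted_neg (lst : List Int) : List Int :=
  lst.foldl (fun l_fin i =>
    if i < 0 then
      -- i = str(abs(i)); l_fin.append(0 - int(i[::-1]))  (s[::-1] is List.reverse, cf. PySem.Str.slice?_none_none_neg_one)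
      let s := PySem.Int.toChars |i|
      l_fin ++ [0 - pvIntOfDigits s.reverse]
    else
      l_fin ++ [i]) []

-- ===== PORT B =====
-- while n: rev = rev*10 + n%10; n //= 10   (n starts as -i ≥ 0, so it runs on a Nat)
def pvRevLoop (n rev : Nat) : Nat :=
  if _h : n = 0 then rev else pvRevLoop (n / 10) (rev * 10 + n % 10)
  termination_by n
  decreasing_by exact Nat.div_lt_self (Nat.pos_of_ne_zero _h) (by omega)

def cmmdc_and_inverted_neg_alt (lst : List Int) : List Int :=
  lst.foldl (fun res i =>
    if i < 0 then
      res ++ [-((pvRevLoop (-i).toNat 0 : Nat) : Int)]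
    else
      res ++ [i]) []

-- ===== PRECONDITION & SPEC =====
def Spec_cmmdc_and_inverted_neg (lst : List Int) (out : List Int) : Prop := out = cmmdc_and_inverted_neg_alt lst
instance (lst : List Int) (out : List Int) : Decidable (Spec_cmmdc_and_inverted_neg lst out) := by unfold Spec_cmmdc_and_inverted_neg; infer_instance

-- ===== CLAIM (what is proved, stated in full; the proofs are below) =====
def Claim_equal_cmmdc_and_inverted_neg : Prop := ∀ (lst : List Int), Dom_cmmdc_and_inverted_neg lst → Spec_cmmdc_and_inverted_neg lst (cmmdc_and_inverted_neg lst)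

-- ===== LEMMAS AND PROOFS =====

-- Nat.toDigits is the base-10 digit list (Mathlib's Nat.digits, LSB first) rendered MSB first.
lemma pvToDigitsCore_eq (f : Nat) : ∀ (n : Nat) (acc : List Char), 0 < n → n < f →
    Nat.toDigitsCore 10 f n acc = ((Nat.digits 10 n).map Nat.digitChar).reverse ++ acc := by
  induction f with
  | zero => intro n acc h hf; omega
  | succ f ih =>
    intro n acc hn hf
    rw [Nat.toDigitsCore]
    by_cases h10 : n / 10 = 0
    · have hlt : n < 10 := by omega
      rw [Nat.digits_def' (by omega) hn, Nat.div_eq_of_lt hlt, Nat.digits_zero,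
        Nat.mod_eq_of_lt hlt]
      simp
    · simp only [h10, if_false]
      rw [ih (n / 10) _ (Nat.pos_of_ne_zero h10) (by
        have := Nat.div_lt_self hn (by omega : 1 < 10); omega)]
      rw [Nat.digits_def' (by omega : 1 < 10) hn]
      simp

lemma pvToDigits_eq (n : Nat) (hn : 0 < n) :
    Nat.toDigits 10 n = ((Nat.digits 10 n).map Nat.digitChar).reverse := by
  rw [Nat.toDigits, pvToDigitsCore_eq (n + 1) n [] hn (by omega)]
  simp

-- the character fold of A's int() over rendered digits is the numeric fold over the digits
lemma pvIntOfDigits_map (ds : List Nat) (h : ∀ d ∈ ds, d < 10) : ∀ (a : Nat),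
    (ds.map Nat.digitChar).foldl (fun a c => a * 10 + ((c.toNat : Int) - 48)) (a : Int)
      = ((ds.foldl (fun a d => a * 10 + d) a : Nat) : Int) := by
  induction ds with
  | nil => intro a; simp
  | cons d ds ih =>
    intro a
    have hd : d < 10 := h d (by simp)
    have hc : ((Nat.digitChar d).toNat : Int) - 48 = (d : Int) := by
      interval_cases d <;> simp [Nat.digitChar]
    simp only [List.map_cons, List.foldl_cons, hc]
    have : (a : Int) * 10 + (d : Int) = ((a * 10 + d : Nat) : Int) := by push_cast; ring
    rw [this, ih (fun x hx => h x (by simp [hx]))]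

-- B's while-loop is the numeric fold over the base-10 digits (LSB first)
lemma pvRevLoop_eq (n : Nat) : ∀ (acc : Nat),
    pvRevLoop n acc = (Nat.digits 10 n).foldl (fun a d => a * 10 + d) acc := by
  induction n using Nat.strong_induction_on with
  | _ n ih =>
    intro acc
    rw [pvRevLoop]
    by_cases hn : n = 0
    · simp [hn]
    · simp only [hn, dite_false]
      rw [ih (n / 10) (Nat.div_lt_self (Nat.pos_of_ne_zero hn) (by omega)),
        Nat.digits_def' (by omega : 1 < 10) (Nat.pos_of_ne_zero hn)]
      simp

-- per-element agreement on a negative entry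
lemma pvElem_neg (i : Int) (hi : i < 0) :
    0 - pvIntOfDigits (PySem.Int.toChars |i|).reverse
      = -((pvRevLoop (-i).toNat 0 : Nat) : Int) := by
  have h1 : |i| = -i := abs_of_neg hi
  have habs : ¬ (|i| < 0) := not_lt.mpr (abs_nonneg i)
  have hm : 0 < (|i|).toNat := by rw [h1]; omega
  rw [PySem.Int.toChars, if_neg habs, pvToDigits_eq _ hm, List.reverse_reverse, h1, pvIntOfDigits]
  have hmap := pvIntOfDigits_map (Nat.digits 10 (-i).toNat)
    (fun d hd => Nat.digits_lt_base (by omega) hd) 0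
  simp only [Nat.cast_zero] at hmap
  rw [hmap, ← pvRevLoop_eq]
  ring

-- ===== VERDICT (by name: the statement is the Claim_ definition above) =====
theorem cmmdc_and_inverted_neg_spec : Claim_equal_cmmdc_and_inverted_neg := by
  intro lst _
  unfold Spec_cmmdc_and_inverted_neg cmmdc_and_inverted_neg cmmdc_and_inverted_neg_alt
  apply PySem.List.foldl_congr_mem
  intro acc i _
  by_cases hi : i < 0
  · simp only [hi, if_true, pvElem_neg i hi]
  · simp [hi]
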